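-- pv_equiv track=rewrite | github.com/thompsonson/atomicguard | src/atomicguard/application/feedback_summarizer.py | _extract_error_signature
-- ===== SOURCE A (Python) =====
-- def _extract_error_signature(feedback: str) -> str:
--     """Extract a short error signature from feedback.
--
--     Attempts to identify the core error type from feedback text.
--     """
--     # Look for common error patterns
--     patterns = [
--         "TypeError:",
--         "AttributeError:",
--         "ImportError:",
--         "SyntaxError:",
--         "NameError:",
--         "ValueError:",
--         "KeyError:",
--         "IndexError:",
--         "AssertionError:",
--         "FileNotFoundError:",
--         "ModuleNotFoundError:",
--         "test failed",
--         "tests failed",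
--         "FAILED",
--         "ERROR",
--         "patch does not apply",
--         "git apply failed",
--     ]
--
--     feedback_lower = feedback.lower()
--     for pattern in patterns:
--         if pattern.lower() in feedback_lower:
--             # Extract the line containing the pattern
--             for line in feedback.split("\n"):
--                 if pattern.lower() in line.lower():
--                     # Clean up and truncate
--                     clean = line.strip()[:100]
--                     return clean
--             return pattern
--
--     # Fallback: first non-empty line
--     for line in feedback.split("\n"):
--         stripped = line.strip()
--         if stripped:
--             return stripped[:80]
--
--     return "Unknown error"
-- ===== SOURCE B (Python) =====
-- def _extract_error_signature(feedback: str) -> str: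
--     """Extract a short error signature from feedback (single line-major scan)."""
--     patterns = [
--         "TypeError:",
--         "AttributeError:",
--         "ImportError:",
--         "SyntaxError:",
--         "NameError:",
--         "ValueError:",
--         "KeyError:",
--         "IndexError:",
--         "AssertionError:",
--         "FileNotFoundError:",
--         "ModuleNotFoundError:",
--         "test failed",
--         "tests failed",
--         "FAILED",
--         "ERROR",
--         "patch does not apply",
--         "git apply failed",
--     ]
--
--     lines = feedback.split("\n")
--
--     # One pass over the lines, keeping the best (lowest-priority-index) pattern
--     # seen so far together with the cleaned first line that achieved it.
--     best = None  # (pattern index, cleaned line)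
--     for line in lines:
--         line_lower = line.lower()
--         limit = len(patterns) if best is None else best[0]
--         for idx, pattern in enumerate(patterns[:limit]):
--             if pattern.lower() in line_lower:
--                 best = (idx, line.strip()[:100])
--                 break
--
--     if best is not None:
--         return best[1]
--
--     # Fallback: first non-empty line
--     for line in lines:
--         stripped = line.strip()
--         if stripped:
--             return stripped[:80]
--
--     return "Unknown error"
-- ===== Notes on version B (the rewrite author's own statement) =====
-- stated objective: alternative
-- what changed: Replaces A's pattern-major strategy (substring test on the whole lowered feedback per pattern, then a rescan of the lines for the winning pattern) with a single line-major pass that keeps the best (lowest-priority-index) pattern seen so far together with the first cleaned line achieving it.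
import Mathlib
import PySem

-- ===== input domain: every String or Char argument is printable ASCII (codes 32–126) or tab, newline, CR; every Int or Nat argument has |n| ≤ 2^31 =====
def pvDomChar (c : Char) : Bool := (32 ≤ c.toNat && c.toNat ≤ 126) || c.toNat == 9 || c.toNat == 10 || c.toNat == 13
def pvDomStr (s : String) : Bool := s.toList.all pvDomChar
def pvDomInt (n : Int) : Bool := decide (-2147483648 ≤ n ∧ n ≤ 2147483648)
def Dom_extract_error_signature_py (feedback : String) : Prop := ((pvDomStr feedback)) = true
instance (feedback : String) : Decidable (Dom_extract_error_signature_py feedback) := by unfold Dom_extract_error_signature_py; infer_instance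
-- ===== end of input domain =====

-- B makes a single line-major pass keeping the best (lowest-index) pattern with its first line,
-- instead of A's pattern-major whole-string tests with a line rescan; objective: alternative.

-- the pattern priority list (shared constant data, local list `patterns` in both Pythons)
def pvPatterns : List String :=
  ["TypeError:", "AttributeError:", "ImportError:", "SyntaxError:", "NameError:",
   "ValueError:", "KeyError:", "IndexError:", "AssertionError:", "FileNotFoundError:",
   "ModuleNotFoundError:", "test failed", "tests failed", "FAILED", "ERROR",
   "patch does not apply", "git apply failed"]

-- ===== PORT A =====
-- inner loop: first line containing pl (pl is the already-lowered pattern), cleaned and truncated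
def pvFindLineA (pl : String) : List String → Option String
  | [] => none
  | l :: ls =>
    if PySem.Str.isIn pl (PySem.Str.lower l) then
      some (PySem.Str.slice (PySem.Str.strip l) none (some 100))
    else pvFindLineA pl ls

-- outer loop over the patterns; `none` from pvFindLineA hits A's `return pattern` branch
def pvLoopA (fbLower : String) (ls : List String) : List String → Option String
  | [] => none
  | p :: ps =>
    if PySem.Str.isIn (PySem.Str.lower p) fbLower then
      some (match pvFindLineA (PySem.Str.lower p) ls with
            | some c => c
            | none => p)
    else pvLoopA fbLower ls ps

-- fallback: first non-empty stripped line, truncated to 80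
def pvFallbackA : List String → String
  | [] => "Unknown error"
  | l :: ls =>
    if PySem.Str.strip l = "" then pvFallbackA ls
    else PySem.Str.slice (PySem.Str.strip l) none (some 80)

def extract_error_signature_py (feedback : String) : String :=
  let lines := (PySem.Str.split? feedback "\n").getD []   -- sep "\n" ≠ "", so split? is `some`
  match pvLoopA (PySem.Str.lower feedback) lines pvPatterns with
  | some r => r
  | none => pvFallbackA lines

-- ===== PORT B =====
-- first index (counting from idx) of a pattern contained in the lowered line
def pvHitB (lineLower : String) : Nat → List String → Option Nat
  | _, [] => none
  | idx, p :: ps =>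
    if PySem.Str.isIn (PySem.Str.lower p) lineLower then some idx
    else pvHitB lineLower (idx + 1) ps

-- one pass over the lines, keeping the best (lowest-index) pattern and its first cleaned line
def pvScanB : Option (Nat × String) → List String → Option (Nat × String)
  | best, [] => best
  | best, l :: ls =>
    let limit : Nat := match best with | none => pvPatterns.length | some (i, _) => i
    match pvHitB (PySem.Str.lower l) 0 (pvPatterns.take limit) with
    | some i => pvScanB (some (i, PySem.Str.slice (PySem.Str.strip l) none (some 100))) ls
    | none => pvScanB best ls

def pvFallbackB : List String → String
  | [] => "Unknown error"
  | l :: ls =>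
    if PySem.Str.strip l = "" then pvFallbackB ls
    else PySem.Str.slice (PySem.Str.strip l) none (some 80)

def extract_error_signature_py_alt (feedback : String) : String :=
  let lines := (PySem.Str.split? feedback "\n").getD []
  match pvScanB none lines with
  | some (_, c) => c
  | none => pvFallbackB lines

-- ===== PRECONDITION & SPEC =====
def Spec_extract_error_signature_py (feedback : String) (out : String) : Prop := out = extract_error_signature_py_alt feedback
instance (feedback : String) (out : String) : Decidable (Spec_extract_error_signature_py feedback out) := by unfold Spec_extract_error_signature_py; infer_instance

-- ===== CLAIM (what is proved, stated in full; the proofs are below) =====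
def Claim_equal_extract_error_signature_py : Prop := ∀ (feedback : String), Dom_extract_error_signature_py feedback → Spec_extract_error_signature_py feedback (extract_error_signature_py feedback)

-- ===== LEMMAS AND PROOFS =====

-- pattern-major reference picker, with indices (proof-side only)
def pvPickIdx (ls : List String) : Nat → List String → Option (Nat × String)
  | _, [] => none
  | i, p :: ps =>
    match pvFindLineA (PySem.Str.lower p) ls with
    | some c => some (i, c)
    | none => pvPickIdx ls (i + 1) ps

-- bridge: PySem's fuel-based splitOn on a one-character separator is Mathlib's List.splitOn
theorem pv_go_spec (fuel : Nat) (l cur : List Char) (acc : List (List Char))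
    (h : l.length < fuel) :
    PySem.Chars.splitOn.go ['\n'] fuel l cur acc
      = acc.reverse ++ (l.splitOn '\n').modifyHead (cur.reverse ++ ·) := by
  induction fuel generalizing l cur acc with
  | zero => omega
  | succ n ih =>
    cases l with
    | nil =>
      simp [PySem.Chars.splitOn.go, List.splitOn]
    | cons c rest =>
      obtain ⟨h0, t0, he⟩ := List.exists_cons_of_ne_nil
        (List.splitOnP_ne_nil (· == '\n') rest)
      have hlen : rest.length < n := by simp at h; omega
      rw [PySem.Chars.splitOn.go]
      by_cases hc : c = '\n'
      · subst hc
        simp only [List.isPrefixOf, Bool.and_true, beq_self_eq_true, if_pos, List.length_cons,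
          List.drop_succ_cons, List.length_nil, List.drop_zero]
        rw [ih rest [] _ hlen]
        simp [List.splitOn, List.splitOnP_cons, he]
      · have hne : (['\n'].isPrefixOf (c :: rest)) = false := by
          simp [List.isPrefixOf]; exact fun hcc => (hc hcc.symm).elim
        rw [hne]
        simp only [Bool.false_eq_true, if_false]
        rw [ih rest (c :: cur) acc hlen]
        simp [List.splitOn, List.splitOnP_cons, he, hc]

theorem pv_splitOn_bridge (cs : List Char) :
    PySem.Chars.splitOn cs ['\n'] = cs.splitOn '\n' := by
  obtain ⟨h0, t0, he⟩ := List.exists_cons_of_ne_nil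
    (List.splitOnP_ne_nil (· == '\n') cs)
  rw [show PySem.Chars.splitOn cs ['\n']
      = PySem.Chars.splitOn.go ['\n'] (cs.length + 1) cs [] [] from rfl,
    pv_go_spec _ _ _ _ (by omega)]
  simp [List.splitOn, he]

-- lowercasing never creates or destroys a newline
theorem pv_lowerChar_nl (c : Char) :
    (PySem.Chars.lowerChar c == '\n') = (c == '\n') := by
  simp only [PySem.Chars.lowerChar, PySem.Chars.isupper]
  split_ifs with h
  · simp only [Bool.and_eq_true, decide_eq_true_eq] at h
    have h1 : 65 ≤ c.toNat := h.1
    have h2 : c.toNat ≤ 90 := h.2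
    have hv : (c.toNat + 32).isValidChar := by
      left; omega
    have : (Char.ofNat (c.toNat + 32)).toNat = c.toNat + 32 := by
      rw [Char.toNat_ofNat, if_pos hv]
    have hL : (Char.ofNat (c.toNat + 32) == '\n') = false := by
      rw [beq_eq_false_iff_ne]
      intro he
      rw [he] at this
      rw [show ('\n').toNat = 10 from rfl] at this
      omega
    have hR : (c == '\n') = false := by
      rw [beq_eq_false_iff_ne]
      intro he
      rw [he] at h1
      rw [show ('\n').toNat = 10 from rfl] at h1
      omega
    rw [hL, hR]
  · rfl

-- lowercasing commutes with splitting on '\n'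
theorem pv_splitOn_lower (cs : List Char) :
    (PySem.Chars.lower cs).splitOn '\n' = (cs.splitOn '\n').map PySem.Chars.lower := by
  induction cs with
  | nil => simp [PySem.Chars.lower, List.splitOn]
  | cons c rest ih =>
    obtain ⟨h0, t0, he⟩ := List.exists_cons_of_ne_nil
      (List.splitOnP_ne_nil (· == '\n') rest)
    have he' : rest.splitOn '\n' = h0 :: t0 := he
    simp only [List.splitOn, PySem.Chars.lower, List.map_cons] at *
    rw [List.splitOnP_cons, List.splitOnP_cons, pv_lowerChar_nl c]
    by_cases hc : (c == '\n') = true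
    · rw [if_pos hc, if_pos hc, ih]
      simp [PySem.Chars.lower]
    · rw [if_neg hc, if_neg hc, ih, he]
      simp [PySem.Chars.lower]

-- an infix without the separator lies inside one chunk
theorem pv_infix_split (q a t : List Char) (hq : '\n' ∉ q)
    (h : q <:+: a ++ '\n' :: t) : q <:+: a ∨ q <:+: t := by
  obtain ⟨u, v, huv⟩ := h
  have hw : u ++ (q ++ v) = a ++ '\n' :: t := by rw [← List.append_assoc]; exact huv
  by_cases h1 : u.length + q.length ≤ a.length
  · left
    have hpre : u ++ q <+: a := by
      apply List.prefix_of_prefix_length_le (l₃ := a ++ '\n' :: t)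
      · rw [← huv]; exact ⟨v, by simp⟩
      · exact ⟨'\n' :: t, rfl⟩
      · simpa using h1
    exact List.IsInfix.trans ⟨u, [], by simp⟩ hpre.isInfix
  · by_cases h2 : a.length + 1 ≤ u.length
    · right
      obtain ⟨k, hk⟩ : ∃ k, u.length = (a ++ ['\n']).length + k :=
        ⟨u.length - a.length - 1, by simp; omega⟩
      have hd2 : (a ++ '\n' :: t).drop u.length = t.drop k := by
        rw [show a ++ '\n' :: t = (a ++ ['\n']) ++ t by simp, hk, List.drop_append]
        simp
      have hqv : q ++ v = t.drop k := by
        rw [← hd2, ← hw, List.drop_left]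
      have hpref : q <+: t.drop k := ⟨v, hqv⟩
      exact hpref.isInfix.trans (List.drop_suffix k t).isInfix
    · exfalso
      have hlt : a.length - u.length < q.length := by omega
      have h3 : a.length < (u ++ (q ++ v)).length := by rw [hw]; simp
      have e2 : (u ++ (q ++ v))[a.length]'h3 = '\n' := by
        simp only [hw]
        rw [List.getElem_append_right (by omega)]
        simp
      have hfin : q[a.length - u.length]'hlt = '\n' := by
        rw [← List.getElem_append_left (bs := v) hlt,
          ← List.getElem_append_right (as := u) (by omega), e2]
        all_goals simp [hw]
        omega
      exact hq (hfin ▸ List.getElem_mem hlt)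

theorem pv_infix_intercalate (q : List Char) (hq : '\n' ∉ q) (hne : q ≠ []) :
    ∀ pieces : List (List Char), q <:+: ['\n'].intercalate pieces →
      ∃ p ∈ pieces, q <:+: p := by
  intro pieces
  induction pieces with
  | nil =>
    intro h
    simp [List.intercalate] at h
    exact absurd h hne
  | cons a rest ih =>
    intro h
    cases rest with
    | nil =>
      refine ⟨a, by simp, ?_⟩
      simpa [List.intercalate] using h
    | cons b rest' =>
      have hi : ['\n'].intercalate (a :: b :: rest')
          = a ++ '\n' :: ['\n'].intercalate (b :: rest') := by
        simp [List.intercalate, List.intersperse_cons₂]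
      rw [hi] at h
      rcases pv_infix_split q a _ hq h with h1 | h2
      · exact ⟨a, by simp, h1⟩
      · obtain ⟨p, hp, hip⟩ := ih h2
        exact ⟨p, by simp [hp], hip⟩

theorem pv_intercalate_infix (q p : List Char) :
    ∀ pieces : List (List Char), p ∈ pieces → q <:+: p →
      q <:+: ['\n'].intercalate pieces := by
  intro pieces
  induction pieces with
  | nil => intro h; simp at h
  | cons a rest ih =>
    intro hmem hqp
    cases rest with
    | nil =>
      simp at hmem
      subst hmem
      simpa [List.intercalate] using hqp
    | cons b rest' =>
      have hi : ['\n'].intercalate (a :: b :: rest')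
          = a ++ '\n' :: ['\n'].intercalate (b :: rest') := by
        simp [List.intercalate, List.intersperse_cons₂]
      rw [hi]
      rcases List.mem_cons.mp hmem with rfl | hmem'
      · exact hqp.trans ⟨[], '\n' :: ['\n'].intercalate (b :: rest'), by simp⟩
      · exact (ih hmem' hqp).trans ⟨a ++ ['\n'], [], by simp⟩

-- CORE: containment in the whole string = containment in some line
theorem pv_core (q ds : List Char) (hq : '\n' ∉ q) (hne : q ≠ []) :
    PySem.Chars.isIn q ds = (ds.splitOn '\n').any (fun piece => PySem.Chars.isIn q piece) := by
  by_cases hin : PySem.Chars.isIn q ds = true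
  · rw [hin]
    symm
    rw [List.any_eq_true]
    have hinf : q <:+: ['\n'].intercalate (ds.splitOn '\n') := by
      rw [List.intercalate_splitOn]
      exact (PySem.Chars.isIn_iff_infix q ds).mp hin
    obtain ⟨p, hp, hip⟩ := pv_infix_intercalate q hq hne _ hinf
    exact ⟨p, hp, (PySem.Chars.isIn_iff_infix q p).mpr hip⟩
  · rw [eq_false_of_ne_true hin]
    symm
    rw [List.any_eq_false]
    intro p hp hcont
    apply hin
    rw [PySem.Chars.isIn_iff_infix]
    rw [← List.intercalate_splitOn ds '\n']
    exact pv_intercalate_infix q p _ hp ((PySem.Chars.isIn_iff_infix q p).mp hcont)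

-- ---- relating the ports to pvPickIdx ----

theorem pvFindLineA_isSome (pl : String) (ls : List String) :
    (pvFindLineA pl ls).isSome
      = ls.any (fun l => PySem.Str.isIn pl (PySem.Str.lower l)) := by
  induction ls with
  | nil => rfl
  | cons l ls ih => simp only [pvFindLineA, List.any_cons]; split <;> simp_all

-- the big fact about port A's outer test, for every pattern
theorem pv_outer_test (p fb : String)
    (hq : '\n' ∉ (PySem.Str.lower p).toList) (hne : (PySem.Str.lower p).toList ≠ []) :
    PySem.Str.isIn (PySem.Str.lower p) (PySem.Str.lower fb)
      = (pvFindLineA (PySem.Str.lower p) ((PySem.Str.split? fb "\n").getD [])).isSome := by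
  rw [pvFindLineA_isSome]
  have hsplit : (PySem.Str.split? fb "\n").getD []
      = (fb.toList.splitOn '\n').map String.ofList := by
    simp [PySem.Str.split?, PySem.Chars.split?, pv_splitOn_bridge,
      show "\n".toList = ['\n'] from rfl]
  rw [hsplit, List.any_map]
  have hlines : ∀ piece : List Char,
      PySem.Str.isIn (PySem.Str.lower p) (PySem.Str.lower (String.ofList piece))
        = PySem.Chars.isIn (PySem.Str.lower p).toList (PySem.Chars.lower piece) := by
    intro piece
    simp [PySem.Str.isIn, PySem.Str.toList_lower, String.toList_ofList]
  simp only [Function.comp_def, hlines]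
  simp only [PySem.Str.isIn, PySem.Str.toList_lower]
  simp only [PySem.Str.toList_lower] at hq hne
  rw [pv_core _ _ hq hne, pv_splitOn_lower, List.any_map]
  rfl

theorem pv_patterns_ok :
    ∀ p ∈ pvPatterns, '\n' ∉ (PySem.Str.lower p).toList ∧ (PySem.Str.lower p).toList ≠ [] := by
  decide

theorem pvLoopA_eq_pick (fb : String) (ls : List String) (i : Nat) (ps : List String)
    (hok : ∀ p ∈ ps, PySem.Str.isIn (PySem.Str.lower p) (PySem.Str.lower fb)
            = (pvFindLineA (PySem.Str.lower p) ls).isSome) :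
    pvLoopA (PySem.Str.lower fb) ls ps = (pvPickIdx ls i ps).map Prod.snd := by
  induction ps generalizing i with
  | nil => rfl
  | cons p ps ih =>
    have hp := hok p (List.mem_cons_self ..)
    simp only [pvLoopA, pvPickIdx]
    by_cases h : PySem.Str.isIn (PySem.Str.lower p) (PySem.Str.lower fb) = true
    · rw [if_pos h]
      rw [h] at hp
      cases hfl : pvFindLineA (PySem.Str.lower p) ls with
      | none => rw [hfl] at hp; simp at hp
      | some c => simp
    · rw [if_neg h]
      rw [eq_false_of_ne_true h] at hp
      cases hfl : pvFindLineA (PySem.Str.lower p) ls with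
      | some c => rw [hfl] at hp; simp at hp
      | none => exact ih (i + 1) (fun q hq => hok q (List.mem_cons_of_mem _ hq))

-- ---- relating port B to pvPickIdx ----

theorem pvHitB_ge (L : String) (i j : Nat) (qs : List String)
    (h : pvHitB L i qs = some j) : i ≤ j := by
  induction qs generalizing i with
  | nil => simp [pvHitB] at h
  | cons p ps ih =>
    simp only [pvHitB] at h
    split at h
    · injection h with h; omega
    · have := ih (i + 1) h; omega

theorem pvHitB_lt (L : String) (i j : Nat) (qs : List String)
    (h : pvHitB L i qs = some j) : j < i + qs.length := by
  induction qs generalizing i with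
  | nil => simp [pvHitB] at h
  | cons p ps ih =>
    simp only [pvHitB] at h
    split at h
    · injection h with h; simp only [List.length_cons]; omega
    · have := ih (i + 1) h; simp only [List.length_cons]; omega

theorem pvPickIdx_nil (i : Nat) (qs : List String) : pvPickIdx [] i qs = none := by
  induction qs generalizing i with
  | nil => rfl
  | cons p ps ih => simp only [pvPickIdx, pvFindLineA]; exact ih (i + 1)

theorem pvPickIdx_step (l : String) (ls : List String) (qs : List String) (i : Nat) :
    pvPickIdx (l :: ls) i qs =
      match pvHitB (PySem.Str.lower l) i qs with
      | none => pvPickIdx ls i qs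
      | some j => (pvPickIdx ls i (qs.take (j - i))).or
          (some (j, PySem.Str.slice (PySem.Str.strip l) none (some 100))) := by
  induction qs generalizing i with
  | nil => simp [pvPickIdx, pvHitB]
  | cons p ps ih =>
    simp only [pvPickIdx, pvFindLineA, pvHitB]
    by_cases hm : PySem.Str.isIn (PySem.Str.lower p) (PySem.Str.lower l) = true
    · rw [if_pos hm, if_pos hm]
      simp [pvPickIdx]
    · rw [if_neg hm, if_neg hm]
      cases hfl : pvFindLineA (PySem.Str.lower p) ls with
      | some c =>
        cases hh : pvHitB (PySem.Str.lower l) (i + 1) ps with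
        | none => simp
        | some j =>
          have hge := pvHitB_ge _ _ _ _ hh
          dsimp only
          obtain ⟨k, hk⟩ : ∃ k, j - i = k + 1 := ⟨j - i - 1, by omega⟩
          rw [hk, List.take_succ_cons]
          simp [pvPickIdx, hfl]
      | none =>
        rw [ih (i + 1)]
        cases hh : pvHitB (PySem.Str.lower l) (i + 1) ps with
        | none => simp
        | some j =>
          have hge := pvHitB_ge _ _ _ _ hh
          dsimp only
          obtain ⟨k, hk⟩ : ∃ k, j - i = k + 1 := ⟨j - i - 1, by omega⟩
          rw [hk, List.take_succ_cons]
          have h2 : j - (i + 1) = k := by omega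
          rw [h2]
          simp [pvPickIdx, hfl]

theorem pvScanB_eq_pick (ls : List String) (b : Option (Nat × String)) :
    pvScanB b ls =
      (pvPickIdx ls 0 (pvPatterns.take
        (match b with | none => pvPatterns.length | some (i, _) => i))).or b := by
  induction ls generalizing b with
  | nil => simp [pvScanB, pvPickIdx_nil]
  | cons l ls ih =>
    simp only [pvScanB]
    generalize hL : (match b with | none => pvPatterns.length | some (i, _) => i) = limit
    cases hh : pvHitB (PySem.Str.lower l) 0 (pvPatterns.take limit) with
    | none => rw [ih b, hL, pvPickIdx_step, hh]
    | some j =>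
      have hlt := pvHitB_lt _ _ _ _ hh
      have hlen : (pvPatterns.take limit).length ≤ limit := List.length_take_le _ _
      rw [ih _, pvPickIdx_step, hh]
      dsimp only
      simp only [Nat.sub_zero, List.take_take, Option.or_assoc, Option.some_or]
      have hj : min j limit = j := by omega
      rw [hj, ih (some (j, PySem.Str.slice (PySem.Str.strip l) none (some 100)))]

theorem pvFallback_eq (ls : List String) : pvFallbackB ls = pvFallbackA ls := by
  induction ls with
  | nil => rfl
  | cons l ls ih => simp only [pvFallbackA, pvFallbackB]; split <;> simp [ih]

-- ===== VERDICT (by name: the statement is the Claim_ definition above) =====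
theorem extract_error_signature_py_spec : Claim_equal_extract_error_signature_py := by
  intro fb _
  unfold Spec_extract_error_signature_py
  have hA : pvLoopA (PySem.Str.lower fb) ((PySem.Str.split? fb "\n").getD []) pvPatterns
      = (pvPickIdx ((PySem.Str.split? fb "\n").getD []) 0 pvPatterns).map Prod.snd := by
    apply pvLoopA_eq_pick
    intro p hp
    exact pv_outer_test p fb (pv_patterns_ok p hp).1 (pv_patterns_ok p hp).2
  have hB : pvScanB none ((PySem.Str.split? fb "\n").getD [])
      = pvPickIdx ((PySem.Str.split? fb "\n").getD []) 0 pvPatterns := by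
    rw [pvScanB_eq_pick]
    simp
  simp only [extract_error_signature_py, extract_error_signature_py_alt, hA, hB]
  cases pvPickIdx ((PySem.Str.split? fb "\n").getD []) 0 pvPatterns with
  | none => simp [pvFallback_eq]
  | some r => cases r; simp
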